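-- pv_equiv track=rewrite | github.com/gschen/where2go-python-test | 1906101001周茂林/2020寒假/C=1-10/7.py | aaa
-- ===== SOURCE A (Python) =====
-- def aaa(N):
--     for a in range(N):
--         for b in range(N):
--             for c in range(N):
--                 for d in range(N):
--                     if a**2 + b**2 + c**2 + d**2 == N:
--                         s = '{} {} {} {}'.format(a, b, c, d)
--                         return s
-- ===== SOURCE B (Python) =====
-- def _isqrt(n):
--     # floor square root of n >= 0 by binary search
--     lo, hi = 0, n + 1
--     while hi - lo > 1:
--         mid = (lo + hi) // 2
--         if mid * mid <= n:
--             lo = mid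
--         else:
--             hi = mid
--     return lo
--
--
-- def aaa(N):
--     if N < 0:
--         return None
--     for a in range(_isqrt(N) + 1):
--         ra = N - a * a
--         for b in range(_isqrt(ra) + 1):
--             rb = ra - b * b
--             for c in range(_isqrt(rb) + 1):
--                 rc = rb - c * c
--                 d = _isqrt(rc)
--                 if d * d == rc:
--                     return '{} {} {} {}'.format(a, b, c, d)
--     return None
-- ===== Notes on version B (the rewrite author's own statement) =====
-- stated objective: faster
-- what changed: Replace the O(N^4) brute-force quadruple loop by three loops bounded by integer square roots with the fourth component computed directly as d = isqrt(remainder) (isqrt by binary search); intended as faster: measured 5984x at the largest size where both finished (A timed out on larger inputs).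
-- intended difference: For N = 0 and N = 1 A returns None because it only searches a,b,c,d < N and so misses d = N itself; B returns the intended decompositions '0 0 0 0' and '0 0 0 1', which do sum to N. — e.g. on aaa(0): A returns none, B returns some "0 0 0 0"
import Mathlib
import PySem

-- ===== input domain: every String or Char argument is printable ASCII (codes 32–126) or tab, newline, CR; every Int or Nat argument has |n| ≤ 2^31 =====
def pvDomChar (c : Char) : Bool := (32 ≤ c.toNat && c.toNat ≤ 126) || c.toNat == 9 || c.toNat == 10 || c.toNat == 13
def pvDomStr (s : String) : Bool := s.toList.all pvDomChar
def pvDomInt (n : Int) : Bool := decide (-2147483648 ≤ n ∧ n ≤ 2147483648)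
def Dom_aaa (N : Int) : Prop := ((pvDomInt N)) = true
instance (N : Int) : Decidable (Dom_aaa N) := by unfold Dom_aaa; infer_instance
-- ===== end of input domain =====

-- B replaces A's brute-force quadruple loop by three sqrt-bounded loops with the last
-- component computed directly via a binary-search integer square root; intended as faster:
-- measured 5984x at the largest size where both finished (A timed out on larger inputs).

-- ===== PORT A =====
-- literal port of A's four nested 'for … in range(N)' loops with early return
def aaa (N : Int) : Option String :=
  (PySem.List.pyRange 0 N 1).findSome? fun a =>
    (PySem.List.pyRange 0 N 1).findSome? fun b =>
      (PySem.List.pyRange 0 N 1).findSome? fun c =>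
        (PySem.List.pyRange 0 N 1).findSome? fun d =>
          if a ^ 2 + b ^ 2 + c ^ 2 + d ^ 2 = N then
            some (PySem.Int.toStr a ++ " " ++ PySem.Int.toStr b ++ " " ++
                  PySem.Int.toStr c ++ " " ++ PySem.Int.toStr d)
          else none

-- ===== PORT B =====
-- port of Source B's _isqrt: binary-search while loop; fuel = (hi-lo).toNat iterations suffice
-- (the loop shrinks hi-lo every step), making the recursion structural
def isqrtLoop (n : Int) : Nat → Int → Int → Int
  | 0, lo, _ => lo
  | fuel + 1, lo, hi =>
      if hi - lo > 1 then
        let mid := PySem.Int.floordiv (lo + hi) 2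
        if mid * mid ≤ n then isqrtLoop n fuel mid hi else isqrtLoop n fuel lo mid
      else lo

def isqrt (n : Int) : Int := isqrtLoop n (n + 1).toNat 0 (n + 1)

def aaa_alt (N : Int) : Option String :=
  if N < 0 then none
  else
    (PySem.List.pyRange 0 (isqrt N + 1) 1).findSome? fun a =>
      let ra := N - a * a
      (PySem.List.pyRange 0 (isqrt ra + 1) 1).findSome? fun b =>
        let rb := ra - b * b
        (PySem.List.pyRange 0 (isqrt rb + 1) 1).findSome? fun c =>
          let rc := rb - c * c
          let d := isqrt rc
          if d * d = rc then
            some (PySem.Int.toStr a ++ " " ++ PySem.Int.toStr b ++ " " ++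
                  PySem.Int.toStr c ++ " " ++ PySem.Int.toStr d)
          else none

-- ===== PRECONDITION & SPEC =====
-- For N = 0 and N = 1 A returns None because it only searches a,b,c,d < N and so misses
-- d = N itself; B returns the intended decompositions "0 0 0 0" and "0 0 0 1".
def D_aaa (N : Int) : Prop := N = 0 ∨ N = 1
instance (N : Int) : Decidable (D_aaa N) := by unfold D_aaa; infer_instance

def Spec_aaa (N : Int) (out : Option String) : Prop := ¬ D_aaa N → out = aaa_alt N
instance (N : Int) (out : Option String) : Decidable (Spec_aaa N out) := by unfold Spec_aaa; infer_instance

def pvDiffWitness_aaa : Int := 0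
def pvDiffWitnessOut_aaa : (Option String) × (Option String) := (none, some "0 0 0 0")

-- ===== CLAIM (what is proved, stated in full; the proofs are below) =====
def Claim_unchanged_aaa : Prop := ∀ (N : Int), Dom_aaa N → Spec_aaa N (aaa N)
def Claim_changed_aaa : Prop := Dom_aaa (pvDiffWitness_aaa) ∧ D_aaa (pvDiffWitness_aaa) ∧ aaa (pvDiffWitness_aaa) = pvDiffWitnessOut_aaa.1 ∧ aaa_alt (pvDiffWitness_aaa) = pvDiffWitnessOut_aaa.2 ∧ pvDiffWitnessOut_aaa.1 ≠ pvDiffWitnessOut_aaa.2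
def Claim_exact_aaa : Prop := ∀ (N : Int), Dom_aaa N → D_aaa N → aaa N ≠ aaa_alt N

-- ===== LEMMAS AND PROOFS =====

lemma findSome?_congr_mem {α β : Type} (l : List α) (f g : α → Option β)
    (h : ∀ x ∈ l, f x = g x) : l.findSome? f = l.findSome? g := by
  induction l with
  | nil => rfl
  | cons x xs ih =>
      simp only [List.findSome?_cons, h x (by simp)]
      cases g x with
      | none => exact ih fun y hy => h y (by simp [hy])
      | some _ => rfl

lemma isqrtLoop_correct (n : Int) (fuel : Nat) :
    ∀ lo hi : Int, 0 ≤ lo → lo * lo ≤ n → n < hi * hi → lo < hi →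
    (hi - lo).toNat ≤ fuel →
    0 ≤ isqrtLoop n fuel lo hi ∧
      isqrtLoop n fuel lo hi * isqrtLoop n fuel lo hi ≤ n ∧
      n < (isqrtLoop n fuel lo hi + 1) * (isqrtLoop n fuel lo hi + 1) := by
  induction fuel with
  | zero =>
      intro lo hi h0 hlo hhi hlt hfuel
      omega
  | succ fuel ih =>
      intro lo hi h0 hlo hhi hlt hfuel
      by_cases hbig : hi - lo > 1
      · have hmid : 2 * PySem.Int.floordiv (lo + hi) 2 ≤ lo + hi ∧
            lo + hi < 2 * (PySem.Int.floordiv (lo + hi) 2 + 1) := by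
          rw [PySem.Int.floordiv_eq_ediv_of_pos (by omega : (0:Int) < 2)]
          omega
        have hlomid : lo < PySem.Int.floordiv (lo + hi) 2 := by omega
        have hmidhi : PySem.Int.floordiv (lo + hi) 2 < hi := by omega
        by_cases hsq : PySem.Int.floordiv (lo + hi) 2 * PySem.Int.floordiv (lo + hi) 2 ≤ n
        · have heq : isqrtLoop n (fuel + 1) lo hi
              = isqrtLoop n fuel (PySem.Int.floordiv (lo + hi) 2) hi := by
            simp only [isqrtLoop]
            rw [if_pos hbig]
            rw [if_pos hsq]
          rw [heq]
          exact ih _ hi (by omega) hsq hhi hmidhi (by omega)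
        · have heq : isqrtLoop n (fuel + 1) lo hi
              = isqrtLoop n fuel lo (PySem.Int.floordiv (lo + hi) 2) := by
            simp only [isqrtLoop]
            rw [if_pos hbig]
            rw [if_neg hsq]
          rw [heq]
          exact ih lo _ h0 hlo (by omega) hlomid (by omega)
      · have : hi = lo + 1 := by omega
        subst this
        simp [isqrtLoop]
        exact ⟨h0, hlo, by simpa using hhi⟩

lemma isqrt_correct (n : Int) (hn : 0 ≤ n) :
    0 ≤ isqrt n ∧ isqrt n * isqrt n ≤ n ∧ n < (isqrt n + 1) * (isqrt n + 1) := by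
  unfold isqrt
  exact isqrtLoop_correct n (n + 1).toNat 0 (n + 1) le_rfl (by simpa using hn)
    (by nlinarith) (by omega) (by omega)

-- x*x ≤ r ≤ N with 2 ≤ N forces x < N
lemma small_lt {N x : Int} (hN : 2 ≤ N) (hx : 0 ≤ x) (h : x * x ≤ N) : x < N := by
  nlinarith

-- generic level lemma: A's scan over [0,N) equals B's scan over [0, isqrt r + 1),
-- provided F vanishes past the square root and agrees with G below it
lemma level_eq (N r : Int) (hN : 2 ≤ N) (h0 : 0 ≤ r) (hr : r ≤ N)
    (F G : Int → Option String)
    (hFG : ∀ x, 0 ≤ x → x * x ≤ r → F x = G x)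
    (hFnone : ∀ x, 0 ≤ x → r < x * x → F x = none) :
    (PySem.List.pyRange 0 N 1).findSome? F
      = (PySem.List.pyRange 0 (isqrt r + 1) 1).findSome? G := by
  obtain ⟨hs0, hs1, hs2⟩ := isqrt_correct r h0
  have hsN : isqrt r < N := small_lt hN hs0 (le_trans hs1 hr)
  rw [PySem.List.pyRange_one_append 0 (isqrt r + 1) N (by omega) (by omega)]
  rw [List.findSome?_append]
  have h2 : (PySem.List.pyRange (isqrt r + 1) N 1).findSome? F = none := by
    rw [List.findSome?_eq_none_iff]
    intro x hx
    rw [PySem.List.mem_pyRange_one] at hx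
    exact hFnone x (by omega) (by nlinarith [hx.1])
  have h1 : (PySem.List.pyRange 0 (isqrt r + 1) 1).findSome? F
      = (PySem.List.pyRange 0 (isqrt r + 1) 1).findSome? G := by
    apply findSome?_congr_mem
    intro x hx
    rw [PySem.List.mem_pyRange_one] at hx
    have hxs : x ≤ isqrt r := by omega
    exact hFG x hx.1 (by nlinarith [hx.1])
  rw [h1, h2]
  cases (PySem.List.pyRange 0 (isqrt r + 1) 1).findSome? G <;> rfl

-- innermost level: A's d-loop over [0,N) equals B's direct perfect-square test
lemma dloop_eq (N r : Int) (hN : 2 ≤ N) (h0 : 0 ≤ r) (hr : r ≤ N) (out : Int → String) :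
    (PySem.List.pyRange 0 N 1).findSome?
        (fun d => if d * d = r then some (out d) else none)
      = if isqrt r * isqrt r = r then some (out (isqrt r)) else none := by
  obtain ⟨hs0, hs1, hs2⟩ := isqrt_correct r h0
  have hsN : isqrt r < N := small_lt hN hs0 (le_trans hs1 hr)
  by_cases hper : isqrt r * isqrt r = r
  · rw [if_pos hper]
    rw [PySem.List.pyRange_one_append 0 (isqrt r) N hs0 (by omega)]
    rw [List.findSome?_append]
    have hpre : (PySem.List.pyRange 0 (isqrt r) 1).findSome?
        (fun d => if d * d = r then some (out d) else none) = none := by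
      rw [List.findSome?_eq_none_iff]
      intro x hx
      rw [PySem.List.mem_pyRange_one] at hx
      have : x * x < r := by nlinarith [hx.1, hx.2]
      simp [this.ne]
    rw [hpre, PySem.List.pyRange_one_cons (by omega)]
    simp [hper]
  · rw [if_neg hper]
    rw [List.findSome?_eq_none_iff]
    intro x hx
    rw [PySem.List.mem_pyRange_one] at hx
    have hx0 := hx.1
    have : x * x ≠ r := by
      rcases lt_trichotomy x (isqrt r) with h | h | h
      · nlinarith
      · rw [h]; exact hper
      · nlinarith
    simp [this]

-- the main equality for N ≥ 2
lemma main_eq (N : Int) (hN : 2 ≤ N) : aaa N = aaa_alt N := by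
  unfold aaa aaa_alt
  rw [if_neg (by omega : ¬ N < 0)]
  apply level_eq N N hN (by omega) le_rfl
  · -- agreement below the square root: level b
    intro a ha0 haN
    apply level_eq N (N - a * a) hN (by omega) (by nlinarith)
    · -- level c
      intro b hb0 hbr
      apply level_eq N (N - a * a - b * b) hN (by omega) (by nlinarith)
      · -- level d
        intro c hc0 hcr
        have := dloop_eq N (N - a * a - b * b - c * c) hN (by omega) (by nlinarith)
          (fun d => PySem.Int.toStr a ++ " " ++ PySem.Int.toStr b ++ " " ++
                    PySem.Int.toStr c ++ " " ++ PySem.Int.toStr d)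
        rw [← this]
        apply findSome?_congr_mem
        intro d _
        have hcond : (a ^ 2 + b ^ 2 + c ^ 2 + d ^ 2 = N) ↔ (d * d = N - a * a - b * b - c * c) := by
          simp only [pow_two]; omega
        simp only [hcond]
      · -- c too big: inner d-loop finds nothing
        intro c hc0 hcr
        rw [List.findSome?_eq_none_iff]
        intro d hd
        rw [PySem.List.mem_pyRange_one] at hd
        have : a ^ 2 + b ^ 2 + c ^ 2 + d ^ 2 ≠ N := by
          simp only [pow_two]; nlinarith [hd.1]
        simp [this]
    · -- b too big
      intro b hb0 hbr
      rw [List.findSome?_eq_none_iff]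
      intro c hc
      rw [PySem.List.mem_pyRange_one] at hc
      rw [List.findSome?_eq_none_iff]
      intro d hd
      rw [PySem.List.mem_pyRange_one] at hd
      have : a ^ 2 + b ^ 2 + c ^ 2 + d ^ 2 ≠ N := by
        simp only [pow_two]; nlinarith [hc.1, hd.1]
      simp [this]
  · -- a too big
    intro a ha0 haN
    rw [List.findSome?_eq_none_iff]
    intro b hb
    rw [PySem.List.mem_pyRange_one] at hb
    rw [List.findSome?_eq_none_iff]
    intro c hc
    rw [PySem.List.mem_pyRange_one] at hc
    rw [List.findSome?_eq_none_iff]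
    intro d hd
    rw [PySem.List.mem_pyRange_one] at hd
    have : a ^ 2 + b ^ 2 + c ^ 2 + d ^ 2 ≠ N := by
      simp only [pow_two]; nlinarith [hb.1, hc.1, hd.1]
    simp [this]

-- ===== VERDICT (by name: the statement is the Claim_ definition above) =====
theorem aaa_spec : Claim_unchanged_aaa := by
  intro N _ hD
  show aaa N = aaa_alt N
  rcases lt_trichotomy N 2 with h | h | h
  · -- N < 2 and N ∉ {0,1}: N < 0, both sides are none
    have hneg : N < 0 := by
      rcases (by omega : N < 0 ∨ N = 0 ∨ N = 1) with h' | h' | h'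
      · exact h'
      · exact absurd (Or.inl h') hD
      · exact absurd (Or.inr h') hD
    unfold aaa aaa_alt
    rw [PySem.List.pyRange_one_eq_nil (by omega), if_pos hneg]
    rfl
  · exact main_eq N (by omega)
  · exact main_eq N (by omega)

theorem aaa_changed : Claim_changed_aaa := by
  unfold Claim_changed_aaa
  refine ⟨by decide, by decide, by decide, ?_, by decide⟩
  decide

theorem aaa_tight : Claim_exact_aaa := by
  intro N _ hD
  rcases hD with h | h <;> subst h <;> decide
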